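-- pv_equiv track=rewrite | github.com/daniel-reich/ubiquitous-fiesta | WH8AfHodqyj4gSB8K_6.py | is_authentic_skewer
-- ===== SOURCE A (Python) =====
-- def is_authentic_skewer(s):
--     vows = 'AOUIE'
--     for c in (s[0], s[-1]):
--         if c in vows or c == '-':
--             return False
--     sep_len = 0
--     i = 1
--     while i < len(s) and s[i] == '-':
--         sep_len += 1
--         i += 1
--     if i == len(s):
--         return False
--     if sep_len == 0:
--         return False
--     if s[i] not in vows:
--         return False
--     last_cons = False
--     sep = '-' * sep_len
--     i += 1
--     while i + sep_len < len(s):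
--         if s[i:i+sep_len] != sep:
--             return False
--         if s[i+sep_len] == '-' or (s[i+sep_len] in vows) != last_cons:
--             return False
--         i += sep_len + 1
--         last_cons = not last_cons
--     return i == len(s)
-- ===== SOURCE B (Python) =====
-- def is_authentic_skewer(s):
--     vows = 'AOUIE'
--     n = len(s)
--     L = 0
--     while 1 + L < n and s[1 + L] == '-':
--         L += 1
--     if L == 0:
--         return False
--     p = L + 1
--     if n % p != 1:
--         return False
--     if ((n + L) // p) % 2 == 0:
--         return False
--     return all(
--         (s[j] != '-' and (s[j] in vows) == ((j // p) % 2 == 1)) if j % p == 0 else s[j] == '-'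
--         for j in range(n)
--     )
-- ===== Notes on version B (the rewrite author's own statement) =====
-- stated objective: alternative
-- what changed: A validates by striding through the string with a state machine (slice comparisons against the separator and an alternating last_cons flag); B measures the leading dash run once and then checks the whole string by position arithmetic: the length must be congruent to 1 mod p=sep_len+1 with an odd token count (n+sep_len)/p, every index divisible by p must hold a non-dash character whose vowelness equals the parity of its token index, and every other index a dash.
-- outside the precondition, e.g. on is_authentic_skewer(''): A raises IndexError, B returns False
import Mathlib
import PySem

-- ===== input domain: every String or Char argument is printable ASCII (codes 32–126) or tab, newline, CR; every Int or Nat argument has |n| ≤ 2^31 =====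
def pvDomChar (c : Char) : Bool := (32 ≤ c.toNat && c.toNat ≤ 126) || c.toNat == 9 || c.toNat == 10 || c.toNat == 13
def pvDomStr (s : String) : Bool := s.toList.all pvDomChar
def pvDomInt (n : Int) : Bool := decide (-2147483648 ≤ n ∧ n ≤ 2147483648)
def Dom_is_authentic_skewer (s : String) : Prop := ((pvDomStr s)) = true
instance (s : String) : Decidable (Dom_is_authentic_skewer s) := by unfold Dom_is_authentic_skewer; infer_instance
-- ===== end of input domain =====

-- B re-checks the skewer by pure position arithmetic (period p = sep_len+1 over all indices)
-- instead of A's strided slicing state machine; objective: alternative (same O(n) cost).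

-- vows = 'AOUIE' (both Pythons define the same constant)
def pvVows : List Char := ['A', 'O', 'U', 'I', 'E']

-- ===== PORT A =====
-- while i < len(s) and s[i] == '-': sep_len += 1; i += 1   (returns (sep_len, i))
def pvSepLoopA (cs : List Char) (i sep_len : Nat) : Nat × Nat :=
  if h : i < cs.length ∧ PySem.List.pyGet? cs (i : Int) = some '-' then
    pvSepLoopA cs (i + 1) (sep_len + 1)
  else (sep_len, i)
termination_by cs.length - i
decreasing_by omega

-- while i + sep_len < len(s): …
def pvMainLoopA (cs sep : List Char) (sep_len i : Nat) (last_cons : Bool) : Bool :=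
  if h : i + sep_len < cs.length then
    if PySem.List.slice cs (some (i : Int)) (some ((i + sep_len : Nat) : Int)) ≠ sep then false
    else
      match PySem.List.pyGet? cs ((i + sep_len : Nat) : Int) with
      | none => false
      | some c =>
        if c = '-' ∨ pvVows.contains c ≠ last_cons then false
        else pvMainLoopA cs sep sep_len (i + sep_len + 1) (!last_cons)
  else decide (i = cs.length)
termination_by cs.length - i
decreasing_by omega

def pvACore (cs : List Char) : Bool :=
  match PySem.List.pyGet? cs 0, PySem.List.pyGet? cs (-1) with
  | some c0, some c1 =>
    if pvVows.contains c0 ∨ c0 = '-' then false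
    else if pvVows.contains c1 ∨ c1 = '-' then false
    else
      let r := pvSepLoopA cs 1 0
      let sep_len := r.1
      let i := r.2
      if i = cs.length then false
      else if sep_len = 0 then false
      else
        match PySem.List.pyGet? cs (i : Int) with
        | none => false
        | some ci =>
          if ¬ pvVows.contains ci then false
          else pvMainLoopA cs (List.replicate sep_len '-') sep_len (i + 1) false
  | _, _ => false

def is_authentic_skewer (s : String) : Bool := pvACore s.toList

-- ===== PORT B =====
-- while 1 + L < n and s[1 + L] == '-': L += 1
def pvSepLoopB (cs : List Char) (L : Nat) : Nat :=
  if h : 1 + L < cs.length ∧ PySem.List.pyGet? cs ((1 + L : Nat) : Int) = some '-' then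
    pvSepLoopB cs (L + 1)
  else L
termination_by cs.length - L
decreasing_by omega

-- body of B's `all(… for j in range(n))` generator
def pvPosOK (cs : List Char) (p j : Nat) : Bool :=
  if j % p = 0 then
    match PySem.List.pyGet? cs (j : Int) with
    | none => false
    | some c => c ≠ '-' && (pvVows.contains c == decide (j / p % 2 = 1))
  else PySem.List.pyGet? cs (j : Int) = some '-'

def pvBCore (cs : List Char) : Bool :=
  let n := cs.length
  let L := pvSepLoopB cs 0
  if L = 0 then false
  else
    let p := L + 1
    if n % p ≠ 1 then false
    else if (n + L) / p % 2 = 0 then false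
    else (List.range n).all (pvPosOK cs p)

def is_authentic_skewer_alt (s : String) : Bool := pvBCore s.toList

-- ===== PRECONDITION & SPEC =====
-- Pre_ excludes only the empty string, on which Python A raises IndexError (s[0]).
def Pre_is_authentic_skewer (s : String) : Prop := s ≠ ""
instance (s : String) : Decidable (Pre_is_authentic_skewer s) := by unfold Pre_is_authentic_skewer; infer_instance
def pvWitness_is_authentic_skewer : String := "B-A-B"

def Spec_is_authentic_skewer (s : String) (out : Bool) : Prop := out = is_authentic_skewer_alt s
instance (s : String) (out : Bool) : Decidable (Spec_is_authentic_skewer s out) := by unfold Spec_is_authentic_skewer; infer_instance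

-- ===== CLAIM (what is proved, stated in full; the proofs are below) =====
def Claim_equal_is_authentic_skewer : Prop := ∀ (s : String), Dom_is_authentic_skewer s → Pre_is_authentic_skewer s → Spec_is_authentic_skewer s (is_authentic_skewer s)

-- ===== LEMMAS AND PROOFS =====

-- semantic content of A's main loop from position i on: the rest of the string is
-- dash-run/letter chunks of period L+1 with alternating letter classes starting at b
def pvTail (cs : List Char) (L i : Nat) (b : Bool) : Prop :=
  (cs.length - i) % (L + 1) = 0 ∧ i ≤ cs.length ∧
  ∀ j, i ≤ j → j < cs.length →
    if (j - i) % (L + 1) < L then cs[j]? = some '-'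
    else ∃ c, cs[j]? = some c ∧ c ≠ '-' ∧ pvVows.contains c = (b ^^ decide ((j - i) / (L + 1) % 2 = 1))

lemma pvXorParity (b : Bool) (x : Nat) :
    (b ^^ decide ((x + 1) % 2 = 1)) = ((!b) ^^ decide (x % 2 = 1)) := by
  rcases Nat.mod_two_eq_zero_or_one x with h | h <;> cases b <;>
    simp [Nat.add_mod, h]

lemma pvTakeDropRep (cs : List Char) (i L : Nat) (h : i + L ≤ cs.length) :
    (cs.drop i).take L = List.replicate L '-' ↔
      ∀ j, i ≤ j → j < i + L → cs[j]? = some '-' := by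
  constructor
  · intro hrep j h1 h2
    have hk : j - i < L := by omega
    have h3 : ((cs.drop i).take L)[j - i]? = some '-' := by
      rw [hrep]; simp [List.getElem?_replicate, hk]
    rw [List.getElem?_take, if_pos hk, List.getElem?_drop] at h3
    rwa [show i + (j - i) = j by omega] at h3
  · intro hall
    apply List.ext_getElem?
    intro k
    by_cases hk : k < L
    · rw [List.getElem?_take, if_pos hk, List.getElem?_drop,
        hall (i + k) (by omega) (by omega)]
      simp [List.getElem?_replicate, hk]
    · rw [List.getElem?_take, if_neg hk]
      simp [List.getElem?_replicate, hk]

lemma pvGetNegOne (cs : List Char) (h : cs ≠ []) :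
    PySem.List.pyGet? cs (-1) = cs[cs.length - 1]? := by
  have hlen : 1 ≤ cs.length := List.length_pos_iff.mpr h
  unfold PySem.List.pyGet? PySem.List.pyIdx?
  rw [if_neg (by omega), if_pos (by push_cast; omega)]
  simp

lemma pvTail_step (cs : List Char) (L i : Nat) (b : Bool) (h : i + L < cs.length) :
    pvTail cs L i b ↔
      ((∀ j, i ≤ j → j < i + L → cs[j]? = some '-') ∧
       (∃ c, cs[i + L]? = some c ∧ c ≠ '-' ∧ pvVows.contains c = b) ∧
       pvTail cs L (i + L + 1) (!b)) := by
  unfold pvTail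
  have hp : 0 < L + 1 := Nat.succ_pos L
  constructor
  · rintro ⟨hmod, hle, hall⟩
    have hdvd : (L + 1) ∣ (cs.length - i) := Nat.dvd_of_mod_eq_zero hmod
    refine ⟨?_, ?_, ?_, by omega, ?_⟩
    · intro j h1 h2
      have h3 := hall j h1 (by omega)
      rwa [if_pos (by rw [Nat.mod_eq_of_lt (by omega)]; omega)] at h3
    · have h3 := hall (i + L) (by omega) h
      rw [if_neg (by rw [Nat.add_sub_cancel_left, Nat.mod_eq_of_lt (by omega)]; omega)] at h3
      obtain ⟨c, hc1, hc2, hc3⟩ := h3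
      refine ⟨c, hc1, hc2, ?_⟩
      rw [hc3, Nat.add_sub_cancel_left, Nat.div_eq_of_lt (by omega)]
      simp
    · have he : cs.length - (i + L + 1) = (cs.length - i) - (L + 1) := by omega
      obtain ⟨t, ht⟩ := Nat.dvd_sub hdvd dvd_rfl
      rw [he, ht]
      simp [Nat.mul_mod_right]
    · intro j h1 h2
      have h3 := hall j (by omega) h2
      have hx : j - i = (j - (i + L + 1)) + (L + 1) := by omega
      rwa [hx, Nat.add_mod_right, Nat.add_div_right _ hp, pvXorParity] at h3
  · rintro ⟨hdash, ⟨c, hc1, hc2, hc3⟩, hmod, hle, hall⟩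
    have hdvd : (L + 1) ∣ (cs.length - (i + L + 1)) := Nat.dvd_of_mod_eq_zero hmod
    refine ⟨?_, by omega, ?_⟩
    · have he : cs.length - i = (cs.length - (i + L + 1)) + (L + 1) := by omega
      rw [he]
      obtain ⟨t, ht⟩ := hdvd
      rw [ht]
      simp [Nat.add_mul_mod_self_left, Nat.mul_add_mod]
    · intro j h1 h2
      by_cases hj1 : j < i + L
      · rw [if_pos (by rw [Nat.mod_eq_of_lt (by omega)]; omega)]
        exact hdash j h1 hj1
      · by_cases hj2 : j = i + L
        · subst hj2
          rw [if_neg (by rw [Nat.add_sub_cancel_left, Nat.mod_eq_of_lt (by omega)]; omega)]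
          refine ⟨c, hc1, hc2, ?_⟩
          rw [hc3, Nat.add_sub_cancel_left, Nat.div_eq_of_lt (by omega)]
          simp
        · have h4 : i + L + 1 ≤ j := by omega
          have h3 := hall j h4 h2
          have hx : j - i = (j - (i + L + 1)) + (L + 1) := by omega
          rw [hx, Nat.add_mod_right, Nat.add_div_right _ hp, pvXorParity]
          exact h3

lemma pvSliceEq (cs : List Char) (i L : Nat) :
    PySem.List.slice cs (some (i : Int)) (some ((i + L : Nat) : Int)) = (cs.drop i).take L := by
  rw [PySem.List.slice_natCast]
  congr 1
  omega

lemma pvMainA_iff (cs : List Char) (L i : Nat) (b : Bool) :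
    pvMainLoopA cs (List.replicate L '-') L i b = true ↔ pvTail cs L i b := by
  fun_induction pvMainLoopA cs (List.replicate L '-') L i b with
  | case1 i b h hs =>  -- slice ≠ sep → false
    simp only [Bool.false_eq_true, false_iff]
    intro hT
    rw [pvSliceEq] at hs
    exact hs ((pvTakeDropRep cs i L (by omega)).mpr ((pvTail_step cs L i b h).mp hT).1)
  | case2 i b h hs hg =>  -- pyGet? = none: impossible
    rw [PySem.List.pyGet?_natCast] at hg
    rw [List.getElem?_eq_getElem h] at hg
    exact absurd hg (by simp)
  | case3 i b h hs c hg hbad =>  -- char check fails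
    simp only [Bool.false_eq_true, false_iff]
    intro hT
    obtain ⟨c', hc1, hc2, hc3⟩ := ((pvTail_step cs L i b h).mp hT).2.1
    rw [PySem.List.pyGet?_natCast] at hg
    rw [hg] at hc1
    obtain rfl : c = c' := by injection hc1
    rcases hbad with hb | hb
    · exact hc2 hb
    · exact hb hc3
  | case4 i b h hs c hg hok ih =>
    rw [ih, pvTail_step cs L i b h]
    rw [pvSliceEq] at hs
    push_neg at hs
    have hd := (pvTakeDropRep cs i L (by omega)).mp hs
    rw [PySem.List.pyGet?_natCast] at hg
    push_neg at hok
    constructor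
    · intro hT; exact ⟨hd, ⟨c, hg, hok.1, hok.2⟩, hT⟩
    · rintro ⟨_, _, hT⟩; exact hT
  | case5 i b h =>
    simp only [decide_eq_true_eq]
    constructor
    · rintro rfl
      exact ⟨by simp, le_refl _, fun j h1 h2 => absurd h2 (by omega)⟩
    · rintro ⟨hmod, hle, -⟩
      by_contra hne
      have h1 : 1 ≤ cs.length - i := by omega
      have h2 : cs.length - i ≤ L := by omega
      rw [Nat.mod_eq_of_lt (by omega)] at hmod
      omega

lemma pvSepLoopB_dashes (cs : List Char) (k : Nat) :
    ∀ j, k ≤ j → j < pvSepLoopB cs k → 1 + j < cs.length ∧ cs[1 + j]? = some '-' := by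
  fun_induction pvSepLoopB cs k with
  | case1 L h ih =>
    intro j h1 h2
    rcases Nat.eq_or_lt_of_le h1 with rfl | hlt
    · exact ⟨h.1, by rw [← PySem.List.pyGet?_natCast]; exact h.2⟩
    · exact ih j hlt h2
  | case2 L h => intro j h1 h2; omega

lemma pvSepAB (cs : List Char) (k : Nat) :
    pvSepLoopA cs (1 + k) k = (pvSepLoopB cs k, 1 + pvSepLoopB cs k) := by
  fun_induction pvSepLoopB cs k with
  | case1 L h ih =>
    rw [pvSepLoopA, dif_pos h]
    simpa [Nat.add_comm, Nat.add_assoc, Nat.add_left_comm] using ih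
  | case2 L h =>
    rw [pvSepLoopA, dif_neg h]

lemma pvContainsNeDash {c : Char} (h : pvVows.contains c = true) : c ≠ '-' := by
  simp only [pvVows, List.contains_eq_mem, decide_eq_true_eq, List.mem_cons,
    List.mem_singleton, List.not_mem_nil, or_false] at h
  rcases h with h | h | h | h | h <;> subst h <;> decide

lemma pvParity2 (q : Nat) : decide ((q + 2) % 2 = 1) = decide (q % 2 = 1) := by
  rcases Nat.mod_two_eq_zero_or_one q with h | h <;> simp [Nat.add_mod, h]

lemma pvPosOK_iff (cs : List Char) (p j : Nat) (hj : j < cs.length) :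
    pvPosOK cs p j = true ↔
      (if j % p = 0 then
        ∃ c, cs[j]? = some c ∧ c ≠ '-' ∧ pvVows.contains c = decide (j / p % 2 = 1)
       else cs[j]? = some '-') := by
  unfold pvPosOK
  rw [PySem.List.pyGet?_natCast, List.getElem?_eq_getElem hj]
  split_ifs with h
  · constructor
    · intro hb
      simp only [Bool.and_eq_true, decide_eq_true_eq, beq_iff_eq] at hb
      exact ⟨cs[j], rfl, hb.1, hb.2⟩
    · rintro ⟨c, hc, h1, h2⟩
      obtain rfl : cs[j] = c := by injection hc
      simp only [Bool.and_eq_true, decide_eq_true_eq, beq_iff_eq, ne_eq]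
      exact ⟨h1, h2⟩
  · simp

lemma pvShift (cs : List Char) (L j : Nat) (hL : 1 ≤ L) (h1 : 1 + L + 1 ≤ j) (h2 : j < cs.length) :
    ((if (j - (1 + L + 1)) % (L + 1) < L then cs[j]? = some '-'
      else ∃ c, cs[j]? = some c ∧ c ≠ '-' ∧
        pvVows.contains c = (false ^^ decide ((j - (1 + L + 1)) / (L + 1) % 2 = 1)))
     ↔ (if j % (L + 1) = 0 then
          ∃ c, cs[j]? = some c ∧ c ≠ '-' ∧ pvVows.contains c = decide (j / (L + 1) % 2 = 1)
        else cs[j]? = some '-')) := by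
  have hdm := Nat.div_add_mod (j - (1 + L + 1)) (L + 1)
  set x := j - (1 + L + 1) with hxdef
  set q := x / (L + 1) with hq
  set r := x % (L + 1) with hr
  have hrlt : r < L + 1 := Nat.mod_lt _ (by omega)
  have hmul : (L + 1) * (q + 1) = (L + 1) * q + (L + 1) := by ring
  have hj2 : j = (L + 1) * (q + 1) + (r + 1) := by omega
  by_cases hrL : r < L
  · have hm : j % (L + 1) = r + 1 := by
      rw [hj2, Nat.mul_add_mod]; exact Nat.mod_eq_of_lt (by omega)
    rw [if_pos hrL, if_neg (by omega)]
  · have hrL' : r = L := by omega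
    have hmul2 : (L + 1) * (q + 2) = (L + 1) * (q + 1) + (L + 1) := by ring
    have hj3 : j = (L + 1) * (q + 2) := by omega
    have hm : j % (L + 1) = 0 := by rw [hj3]; exact Nat.mul_mod_right _ _
    have hd : j / (L + 1) = q + 2 := by rw [hj3]; exact Nat.mul_div_cancel_left _ (by omega)
    rw [if_neg (by omega), if_pos hm, hd]
    constructor <;> rintro ⟨c, hc, h3, h4⟩ <;> refine ⟨c, hc, h3, ?_⟩ <;>
      rw [h4] <;> simp [pvParity2]

lemma pvACore_form (cs : List Char) (hne : cs ≠ []) (c0 c1 : Char)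
    (hc0 : cs[0]? = some c0) (hc1 : cs[cs.length - 1]? = some c1) :
    pvACore cs =
      (if pvVows.contains c0 = true ∨ c0 = '-' then false
       else if pvVows.contains c1 = true ∨ c1 = '-' then false
       else if 1 + pvSepLoopB cs 0 = cs.length then false
       else if pvSepLoopB cs 0 = 0 then false
       else match PySem.List.pyGet? cs ((1 + pvSepLoopB cs 0 : Nat) : Int) with
            | none => false
            | some ci =>
              if ¬ pvVows.contains ci then false
              else pvMainLoopA cs (List.replicate (pvSepLoopB cs 0) '-')
                     (pvSepLoopB cs 0) (1 + pvSepLoopB cs 0 + 1) false) := by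
  unfold pvACore
  rw [show PySem.List.pyGet? cs 0 = some c0 from by
        rw [← hc0]; simpa using PySem.List.pyGet?_natCast cs 0,
      pvGetNegOne cs hne, hc1,
      show pvSepLoopA cs 1 0 = (pvSepLoopB cs 0, 1 + pvSepLoopB cs 0) from by
        simpa using pvSepAB cs 0]

lemma pvBCore_iff (cs : List Char) (hL0 : pvSepLoopB cs 0 ≠ 0) :
    pvBCore cs = true ↔
      (cs.length % (pvSepLoopB cs 0 + 1) = 1 ∧
       (cs.length + pvSepLoopB cs 0) / (pvSepLoopB cs 0 + 1) % 2 = 1 ∧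
       ∀ j, j < cs.length → pvPosOK cs (pvSepLoopB cs 0 + 1) j = true) := by
  simp only [pvBCore]
  rw [if_neg hL0]
  split_ifs with ha hb
  · exact iff_of_false (by simp) (fun h => ha h.1)
  · exact iff_of_false (by simp) (fun h => by omega)
  · rw [List.all_eq_true]
    constructor
    · intro h
      exact ⟨by omega, by omega, fun j hj => h _ (List.mem_range.mpr hj)⟩
    · rintro ⟨-, -, h3⟩ j hj
      exact h3 _ (List.mem_range.mp hj)

lemma pvACore_form2 (cs : List Char) (hne : cs ≠ []) (c0 c1 : Char)
    (hc0 : cs[0]? = some c0) (hc1 : cs[cs.length - 1]? = some c1)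
    (hLn : 1 + pvSepLoopB cs 0 < cs.length)
    (g0 : ¬ (pvVows.contains c0 = true ∨ c0 = '-'))
    (g1 : ¬ (pvVows.contains c1 = true ∨ c1 = '-'))
    (g3 : pvSepLoopB cs 0 ≠ 0) :
    pvACore cs =
      (if ¬ pvVows.contains (cs[1 + pvSepLoopB cs 0]'hLn) then false
       else pvMainLoopA cs (List.replicate (pvSepLoopB cs 0) '-')
              (pvSepLoopB cs 0) (1 + pvSepLoopB cs 0 + 1) false) := by
  rw [pvACore_form cs hne c0 c1 hc0 hc1, if_neg g0, if_neg g1, if_neg (by omega), if_neg g3,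
      show PySem.List.pyGet? cs ((1 + pvSepLoopB cs 0 : Nat) : Int)
          = some (cs[1 + pvSepLoopB cs 0]'hLn) from by
        rw [PySem.List.pyGet?_natCast]; exact List.getElem?_eq_getElem hLn]

lemma pvAtoB (cs : List Char) (hne : cs ≠ []) (hA : pvACore cs = true) : pvBCore cs = true := by
  have hn1 : 0 < cs.length := List.length_pos_iff.mpr hne
  obtain ⟨c0, hc0⟩ : ∃ c, cs[0]? = some c := ⟨_, List.getElem?_eq_getElem hn1⟩
  obtain ⟨c1, hc1⟩ : ∃ c, cs[cs.length - 1]? = some c := ⟨_, List.getElem?_eq_getElem (by omega)⟩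
  rw [pvACore_form cs hne c0 c1 hc0 hc1] at hA
  by_cases g0 : pvVows.contains c0 = true ∨ c0 = '-'
  · rw [if_pos g0] at hA; exact absurd hA (by simp)
  rw [if_neg g0] at hA
  by_cases g1 : pvVows.contains c1 = true ∨ c1 = '-'
  · rw [if_pos g1] at hA; exact absurd hA (by simp)
  rw [if_neg g1] at hA
  by_cases g2 : 1 + pvSepLoopB cs 0 = cs.length
  · rw [if_pos g2] at hA; exact absurd hA (by simp)
  rw [if_neg g2] at hA
  by_cases g3 : pvSepLoopB cs 0 = 0
  · rw [if_pos g3] at hA; exact absurd hA (by simp)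
  rw [if_neg g3] at hA
  set L := pvSepLoopB cs 0 with hLdef
  have hL1 : 1 ≤ L := by omega
  have hdash : ∀ j, j < L → 1 + j < cs.length ∧ cs[1 + j]? = some '-' :=
    fun j hj => pvSepLoopB_dashes cs 0 j (by omega) (by omega)
  have hLn : 1 + L < cs.length := by
    have := (hdash (L - 1) (by omega)).1; omega
  have hgv : PySem.List.pyGet? cs ((1 + L : Nat) : Int) = some (cs[1 + L]'hLn) := by
    rw [PySem.List.pyGet?_natCast]; exact List.getElem?_eq_getElem hLn
  rw [hgv] at hA
  have hA2 : (if ¬ pvVows.contains (cs[1 + L]'hLn) = true then false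
              else pvMainLoopA cs (List.replicate L '-') L (1 + L + 1) false) = true := hA
  by_cases g4 : pvVows.contains (cs[1 + L]'hLn) = true
  swap
  · rw [if_pos (by simpa using g4)] at hA2; exact absurd hA2 (by simp)
  rw [if_neg (by simpa using g4)] at hA2
  rw [pvMainA_iff] at hA2
  obtain ⟨hmod, hle, hall⟩ := hA2
  obtain ⟨t, ht⟩ := Nat.dvd_of_mod_eq_zero hmod
  have hn2 : cs.length = (L + 1) * t + (1 + L + 1) := by
    have := (Nat.sub_eq_iff_eq_add hle).mp ht; omega
  rcases Nat.eq_zero_or_pos t with rfl | ht1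
  · exfalso
    have he : cs.length - 1 = 1 + L := by omega
    rw [he, List.getElem?_eq_getElem hLn] at hc1
    obtain rfl : c1 = cs[1 + L]'hLn := (Option.some.inj hc1).symm
    exact g1 (Or.inl g4)
  obtain ⟨u, rfl⟩ : ∃ u, t = u + 1 := ⟨t - 1, by omega⟩
  have hmu1 : (L + 1) * (u + 1) = (L + 1) * u + (L + 1) := by ring
  have hmu2 : (L + 1) * (u + 2) = (L + 1) * (u + 1) + (L + 1) := by ring
  have hmu3 : (L + 1) * (u + 3) = (L + 1) * (u + 2) + (L + 1) := by ring
  have hlast := hall (cs.length - 1) (by omega) (by omega)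
  have hx : cs.length - 1 - (1 + L + 1) = (L + 1) * u + L := by omega
  have hxm : ((L + 1) * u + L) % (L + 1) = L := by
    rw [Nat.mul_add_mod]; exact Nat.mod_eq_of_lt (by omega)
  have hxd : ((L + 1) * u + L) / (L + 1) = u := by
    rw [Nat.mul_add_div (by omega), Nat.div_eq_of_lt (by omega)]
    omega
  rw [hx, if_neg (by rw [hxm]; omega)] at hlast
  obtain ⟨c, hcj, hcd, hcv⟩ := hlast
  rw [hc1] at hcj
  obtain rfl : c1 = c := Option.some.inj hcj
  rw [hxd] at hcv
  have hcont : pvVows.contains c1 = false := by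
    cases hcc : pvVows.contains c1
    · rfl
    · exact absurd (Or.inl hcc) g1
  have hu : u % 2 = 0 := by
    rw [hcont] at hcv
    rcases Nat.mod_two_eq_zero_or_one u with h | h
    · exact h
    · rw [h] at hcv; simp at hcv
  apply (pvBCore_iff cs g3).mpr
  rw [← hLdef]
  refine ⟨?_, ?_, ?_⟩
  · have he : cs.length = (L + 1) * (u + 2) + 1 := by omega
    rw [he, Nat.mul_add_mod]
    exact Nat.mod_eq_of_lt (by omega)
  · have hnl : cs.length + L = (L + 1) * (u + 3) := by omega
    rw [hnl, Nat.mul_div_cancel_left _ (by omega : 0 < L + 1)]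
    omega
  · intro j hj
    rw [pvPosOK_iff cs (L + 1) j hj]
    by_cases hj0 : j = 0
    · subst hj0
      rw [if_pos (by simp)]
      refine ⟨c0, hc0, fun h => g0 (Or.inr h), ?_⟩
      have hc00 : pvVows.contains c0 = false := by
        cases hcc : pvVows.contains c0
        · rfl
        · exact absurd (Or.inl hcc) g0
      rw [hc00]
      simp
    · by_cases hjL : j ≤ L
      · rw [if_neg (by rw [Nat.mod_eq_of_lt (by omega)]; omega)]
        have := (hdash (j - 1) (by omega)).2
        rwa [show 1 + (j - 1) = j from by omega] at this
      · by_cases hjp : j = 1 + L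
        · subst hjp
          have hm0 : (1 + L) % (L + 1) = 0 := by
            rw [show 1 + L = (L + 1) * 1 from by ring, Nat.mul_mod_right]
          have hd1 : (1 + L) / (L + 1) = 1 := by
            rw [show 1 + L = (L + 1) * 1 from by ring, Nat.mul_div_cancel_left _ (by omega : 0 < L + 1)]
          rw [if_pos hm0, hd1]
          exact ⟨_, List.getElem?_eq_getElem hLn, pvContainsNeDash g4, by rw [g4]; simp⟩
        · rw [← pvShift cs L j hL1 (by omega) hj]
          exact hall j (by omega) hj

lemma pvBtoA (cs : List Char) (hne : cs ≠ []) (hB : pvBCore cs = true) : pvACore cs = true := by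
  have hn1 : 0 < cs.length := List.length_pos_iff.mpr hne
  obtain ⟨c0, hc0⟩ : ∃ c, cs[0]? = some c := ⟨_, List.getElem?_eq_getElem hn1⟩
  obtain ⟨c1, hc1⟩ : ∃ c, cs[cs.length - 1]? = some c := ⟨_, List.getElem?_eq_getElem (by omega)⟩
  have g3 : pvSepLoopB cs 0 ≠ 0 := by
    intro h
    rw [show pvBCore cs = false from by simp only [pvBCore]; rw [if_pos h]] at hB
    cases hB
  obtain ⟨h1, h2, h3⟩ := (pvBCore_iff cs g3).mp hB
  set L := pvSepLoopB cs 0 with hLdef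
  have hL1 : 1 ≤ L := by omega
  have hn2 : 2 ≤ cs.length := by
    have := (pvSepLoopB_dashes cs 0 0 (by omega) (by omega)).1; omega
  obtain ⟨q, hq⟩ : ∃ q, cs.length = (L + 1) * q + 1 :=
    ⟨cs.length / (L + 1), by have := Nat.div_add_mod cs.length (L + 1); omega⟩
  have hmq1 : (L + 1) * (q + 1) = (L + 1) * q + (L + 1) := by ring
  have hq1 : 1 ≤ q := by
    rcases Nat.eq_zero_or_pos q with h | h
    · rw [h] at hq; omega
    · exact h
  have hnl : cs.length + L = (L + 1) * (q + 1) := by omega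
  have hdq : (cs.length + L) / (L + 1) = q + 1 := by
    rw [hnl, Nat.mul_div_cancel_left _ (by omega : 0 < L + 1)]
  rw [hdq] at h2
  have hqe : q % 2 = 0 := by
    rcases Nat.mod_two_eq_zero_or_one q with h | h
    · exact h
    · exfalso; omega
  have hq2 : 2 ≤ q := by omega
  obtain ⟨v, rfl⟩ : ∃ v, q = v + 2 := ⟨q - 2, by omega⟩
  have hmv2 : (L + 1) * (v + 2) = (L + 1) * v + (L + 1) + (L + 1) := by ring
  have hmv1 : (L + 1) * (v + 1) = (L + 1) * v + (L + 1) := by ring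
  have hn3 : cs.length = (L + 1) * v + 2 * L + 3 := by omega
  -- positions
  have hpos : ∀ j, j < cs.length →
      (if j % (L + 1) = 0 then
        ∃ c, cs[j]? = some c ∧ c ≠ '-' ∧ pvVows.contains c = decide (j / (L + 1) % 2 = 1)
       else cs[j]? = some '-') :=
    fun j hj => (pvPosOK_iff cs (L + 1) j hj).mp (h3 j hj)
  -- j = 0
  have hp0 := hpos 0 (by omega)
  rw [if_pos (by simp)] at hp0
  obtain ⟨c, hc, hcd0, hcv0⟩ := hp0
  rw [hc0] at hc
  obtain rfl : c0 = c := Option.some.inj hc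
  rw [Nat.zero_div] at hcv0
  have hcont0 : pvVows.contains c0 = false := by rw [hcv0]; simp
  -- j = n - 1
  have hmulq : cs.length - 1 = (L + 1) * (v + 2) := by omega
  have hplast := hpos (cs.length - 1) (by omega)
  rw [hmulq, if_pos (Nat.mul_mod_right _ _),
      Nat.mul_div_cancel_left _ (by omega : 0 < L + 1)] at hplast
  obtain ⟨c, hc, hcd1, hcv1⟩ := hplast
  rw [← hmulq] at hc
  rw [hc1] at hc
  obtain rfl : c1 = c := Option.some.inj hc
  have hcont1 : pvVows.contains c1 = false := by rw [hcv1]; simp [hqe]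
  -- j = 1 + L
  have hLn : 1 + L < cs.length := by omega
  have hm0 : (1 + L) % (L + 1) = 0 := by
    rw [show 1 + L = (L + 1) * 1 from by ring, Nat.mul_mod_right]
  have hd1 : (1 + L) / (L + 1) = 1 := by
    rw [show 1 + L = (L + 1) * 1 from by ring, Nat.mul_div_cancel_left _ (by omega : 0 < L + 1)]
  have hpv := hpos (1 + L) hLn
  rw [if_pos hm0, hd1] at hpv
  obtain ⟨c, hc, hcdv, hcvv⟩ := hpv
  rw [List.getElem?_eq_getElem hLn] at hc
  have hg4 : pvVows.contains (cs[1 + L]'hLn) = true := by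
    obtain rfl : cs[1 + L]'hLn = c := Option.some.inj hc
    rw [hcvv]; simp
  rw [pvACore_form2 cs hne c0 c1 hc0 hc1 hLn
      (by rw [hcont0]; simp; intro h; exact hcd0 h)
      (by rw [hcont1]; simp; intro h; exact hcd1 h) g3]
  rw [if_neg (by simpa using hg4)]
  rw [pvMainA_iff]
  refine ⟨?_, by omega, ?_⟩
  · have he : cs.length - (1 + L + 1) = (L + 1) * (v + 1) := by omega
    rw [he]
    exact Nat.mul_mod_right _ _
  · intro j hj1 hj2
    rw [pvShift cs L j hL1 hj1 hj2]
    exact hpos j hj2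

lemma pvCore_eq (cs : List Char) (hne : cs ≠ []) : pvACore cs = pvBCore cs := by
  cases hA : pvACore cs <;> cases hB : pvBCore cs
  · rfl
  · exact absurd (pvBtoA cs hne hB) (by simp [hA])
  · exact absurd (pvAtoB cs hne hA) (by simp [hB])
  · rfl

-- ===== VERDICT (by name: the statement is the Claim_ definition above) =====
theorem is_authentic_skewer_spec : Claim_equal_is_authentic_skewer := by
  intro s _ hpre
  unfold Spec_is_authentic_skewer is_authentic_skewer is_authentic_skewer_alt
  exact pvCore_eq s.toList (fun hnil => hpre (String.toList_inj.mp (by simpa using hnil)))
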